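-- pv_equiv track=rewrite | github.com/Azure-Samples/openai | End_to_end_Solutions/InsightsGenerator/insights_generator/core/extract_statistical_summary.py | calculate_overall_statistics
-- ===== SOURCE A (Python) =====
-- from collections import defaultdict
--
-- def calculate_overall_statistics(reviews, top_aspects):
--
--     overall_statistics_dict = {}
--     for aspect in top_aspects:
--         overall_statistics_dict[aspect] = defaultdict(int)
--
--     for review in reviews:
--         top_aspect_sentiments = review["top_aspect_sentiments"]
--         if top_aspect_sentiments is None:
--             continue
--         for aspect, sentiment in top_aspect_sentiments.items():
--             # There may be some aspects in reviews, which are not in top_aspects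
--             # since the latter is truncated to top 10. Hence the if
--             if aspect in overall_statistics_dict:
--                 overall_statistics_dict[aspect][sentiment] += 1
--
--     return(overall_statistics_dict)
-- ===== SOURCE B (Python) =====
-- from collections import defaultdict
--
-- def calculate_overall_statistics(reviews, top_aspects):
--     result = {}
--     for aspect in top_aspects:
--         counts = defaultdict(int)
--         for review in reviews:
--             top_aspect_sentiments = review["top_aspect_sentiments"]
--             if top_aspect_sentiments is None:
--                 continue
--             if aspect in top_aspect_sentiments:
--                 counts[top_aspect_sentiments[aspect]] += 1
--         result[aspect] = counts
--     return result
-- ===== Notes on version B (the rewrite author's own statement) =====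
-- stated objective: alternative
-- what changed: B flips the loop nesting: instead of one pass over reviews updating a dict-of-dicts keyed by aspect, it loops over each top aspect and rescans all reviews to build that aspect's sentiment counter independently.
import Mathlib
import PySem

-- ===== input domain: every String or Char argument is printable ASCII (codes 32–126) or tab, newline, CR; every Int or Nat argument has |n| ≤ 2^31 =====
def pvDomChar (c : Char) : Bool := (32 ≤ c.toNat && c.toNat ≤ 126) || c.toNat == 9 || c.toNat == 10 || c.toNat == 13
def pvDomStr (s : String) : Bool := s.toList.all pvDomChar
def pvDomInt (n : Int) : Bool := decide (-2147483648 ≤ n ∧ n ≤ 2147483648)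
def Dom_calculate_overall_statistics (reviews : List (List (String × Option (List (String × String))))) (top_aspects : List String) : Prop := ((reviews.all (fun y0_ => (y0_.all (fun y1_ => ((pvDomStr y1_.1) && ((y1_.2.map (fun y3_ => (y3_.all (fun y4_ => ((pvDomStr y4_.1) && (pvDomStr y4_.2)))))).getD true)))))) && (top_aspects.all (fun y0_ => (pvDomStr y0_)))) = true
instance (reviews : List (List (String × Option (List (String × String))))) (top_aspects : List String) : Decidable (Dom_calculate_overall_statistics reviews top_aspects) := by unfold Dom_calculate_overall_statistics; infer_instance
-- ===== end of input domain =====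

-- B flips the loop nesting (per-aspect rescan of all reviews with a fresh counter) instead of A's single
-- pass over reviews into a dict-of-dicts; same cost class, alternative decomposition.

-- ===== PORT A =====
-- overall_statistics_dict[aspect] = defaultdict(int)  for aspect in top_aspects
def pvInit (top_aspects : List String) : PySem.Dict String (PySem.Dict String Int) :=
  top_aspects.foldl (fun d a => d.insert a PySem.Dict.empty) PySem.Dict.empty

-- body of "for aspect, sentiment in top_aspect_sentiments.items()"
def pvStepItem (d : PySem.Dict String (PySem.Dict String Int)) (p : String × String) :
    PySem.Dict String (PySem.Dict String Int) :=
  if d.contains p.1 then d.modify p.1 PySem.Dict.empty (fun inner => inner.modify p.2 0 (· + 1)) else d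

-- body of "for review in reviews"; the `none` (KeyError) branch is excluded by Pre_
def pvStepReview (d : PySem.Dict String (PySem.Dict String Int))
    (review : List (String × Option (List (String × String)))) :
    PySem.Dict String (PySem.Dict String Int) :=
  match (PySem.Dict.ofList review).get? "top_aspect_sentiments" with
  | some (some tas) => (PySem.Dict.ofList tas).items.foldl pvStepItem d
  | _ => d

def calculate_overall_statistics (reviews : List (List (String × Option (List (String × String))))) (top_aspects : List String) : List (String × List (String × Int)) :=
  ((reviews.foldl pvStepReview (pvInit top_aspects)).items.map (fun p => (p.1, p.2.items)))

-- ===== PORT B =====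
-- inner loop of B: one counter per aspect, rescanning every review
def pvCounts (reviews : List (List (String × Option (List (String × String))))) (aspect : String) :
    PySem.Dict String Int :=
  reviews.foldl (fun c review =>
    match (PySem.Dict.ofList review).get? "top_aspect_sentiments" with
    | some (some tas) =>
        match (PySem.Dict.ofList tas).get? aspect with
        | some s => c.modify s 0 (· + 1)
        | none => c
    | _ => c) PySem.Dict.empty

def calculate_overall_statistics_alt (reviews : List (List (String × Option (List (String × String))))) (top_aspects : List String) : List (String × List (String × Int)) :=
  ((top_aspects.foldl (fun res aspect => res.insert aspect (pvCounts reviews aspect))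
      PySem.Dict.empty).items.map (fun p => (p.1, p.2.items)))

-- ===== PRECONDITION & SPEC =====
-- Pre_ excludes exactly the reviews lacking the "top_aspect_sentiments" key, on which A raises KeyError.
def Pre_calculate_overall_statistics (reviews : List (List (String × Option (List (String × String))))) (top_aspects : List String) : Prop :=
  (reviews.all (fun r => r.any (fun p => p.1 == "top_aspect_sentiments"))) = true
instance (reviews : List (List (String × Option (List (String × String))))) (top_aspects : List String) : Decidable (Pre_calculate_overall_statistics reviews top_aspects) := by unfold Pre_calculate_overall_statistics; infer_instance

def pvWitness_calculate_overall_statistics : (List (List (String × Option (List (String × String))))) × List String :=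
  ([[("top_aspect_sentiments", some [("room", "positive")])]], ["room", "food"])

def Spec_calculate_overall_statistics (reviews : List (List (String × Option (List (String × String))))) (top_aspects : List String) (out : List (String × List (String × Int))) : Prop := out = calculate_overall_statistics_alt reviews top_aspects
instance (reviews : List (List (String × Option (List (String × String))))) (top_aspects : List String) (out : List (String × List (String × Int))) : Decidable (Spec_calculate_overall_statistics reviews top_aspects out) := by unfold Spec_calculate_overall_statistics; infer_instance

-- ===== CLAIM (what is proved, stated in full; the proofs are below) =====
def Claim_equal_calculate_overall_statistics : Prop := ∀ (reviews : List (List (String × Option (List (String × String))))) (top_aspects : List String), Dom_calculate_overall_statistics reviews top_aspects → Pre_calculate_overall_statistics reviews top_aspects → Spec_calculate_overall_statistics reviews top_aspects (calculate_overall_statistics reviews top_aspects)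

-- ===== LEMMAS AND PROOFS =====

-- sentiments contributed to aspect `a` by the whole review list, in processing order
def pvOcc (rs : List (List (String × Option (List (String × String))))) (a : String) : List String :=
  rs.flatMap (fun review =>
    match (PySem.Dict.ofList review).get? "top_aspect_sentiments" with
    | some (some tas) => ((PySem.Dict.ofList tas).items.filter (fun p => p.1 == a)).map (·.2)
    | _ => [])

lemma pvStepItem_get? (L : List (String × String)) (d : PySem.Dict String (PySem.Dict String Int)) (a : String) :
    (L.foldl pvStepItem d).get? a =
      (d.get? a).map (fun inner => ((L.filter (fun p => p.1 == a)).map (·.2)).foldl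
        (fun c s => c.modify s 0 (· + 1)) inner) := by
  induction L generalizing d with
  | nil => simp
  | cons p L ih =>
    simp only [List.foldl_cons, ih, List.filter_cons]
    by_cases h : p.1 = a
    · have hd : (pvStepItem d p).get? a = (d.get? a).map (fun inner => inner.modify p.2 0 (· + 1)) := by
        subst h
        unfold pvStepItem
        cases hg : d.get? p.1 with
        | none =>
          have : d.contains p.1 = false := by
            rw [PySem.Dict.contains_eq_isSome_get?, hg]; rfl
          simp [this, hg]
        | some inner =>
          have hc : d.contains p.1 = true := by
            rw [PySem.Dict.contains_eq_isSome_get?, hg]; rfl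
          simp only [hc, if_true, PySem.Dict.modify]
          rw [PySem.Dict.get?_insert_self, PySem.Dict.getD_of_get?_eq_some d PySem.Dict.empty hg]
          simp
      rw [hd]
      simp only [h, BEq.rfl, if_true]
      cases d.get? a <;> simp
    · have hb : (p.1 == a) = false := by simpa using h
      have hd : (pvStepItem d p).get? a = d.get? a := by
        unfold pvStepItem
        by_cases hc : d.contains p.1
        · simp only [hc, if_true, PySem.Dict.modify]
          exact PySem.Dict.get?_insert_of_ne _ _ (fun he => h he.symm)
        · simp [hc]
      rw [hd, hb]
      simp

lemma pvStepReview_foldl_get? (rs : List (List (String × Option (List (String × String)))))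
    (d : PySem.Dict String (PySem.Dict String Int)) (a : String) :
    (rs.foldl pvStepReview d).get? a =
      (d.get? a).map (fun inner => (pvOcc rs a).foldl (fun c s => c.modify s 0 (· + 1)) inner) := by
  induction rs generalizing d with
  | nil => simp [pvOcc]
  | cons r rs ih =>
    simp only [List.foldl_cons, ih]
    have : pvOcc (r :: rs) a =
        (match (PySem.Dict.ofList r).get? "top_aspect_sentiments" with
         | some (some tas) => ((PySem.Dict.ofList tas).items.filter (fun p => p.1 == a)).map (·.2)
         | _ => []) ++ pvOcc rs a := by
      simp only [pvOcc, List.flatMap_cons]; rfl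
    rw [this]
    unfold pvStepReview
    cases hg : (PySem.Dict.ofList r).get? "top_aspect_sentiments" with
    | none => dsimp only; cases d.get? a <;> simp
    | some o =>
      cases o with
      | none => dsimp only; cases d.get? a <;> simp
      | some tas =>
        dsimp only
        rw [pvStepItem_get? _ d a]
        cases d.get? a <;> simp [List.foldl_append]

lemma pvInit_get? (l : List String) (d : PySem.Dict String (PySem.Dict String Int)) (a : String) :
    (l.foldl (fun d a => d.insert a PySem.Dict.empty) d).get? a =
      if a ∈ l then some PySem.Dict.empty else d.get? a := by
  induction l generalizing d with
  | nil => simp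
  | cons b l ih =>
    simp only [List.foldl_cons, ih, List.mem_cons]
    by_cases h : a ∈ l
    · simp [h]
    · by_cases hab : a = b
      · subst hab; simp [h, PySem.Dict.get?_insert_self]
      · simp [h, hab, PySem.Dict.get?_insert_of_ne _ _ hab]

lemma pvAlt_get? (reviews : List (List (String × Option (List (String × String)))))
    (l : List String) (res : PySem.Dict String (PySem.Dict String Int)) (a : String) :
    (l.foldl (fun res aspect => res.insert aspect (pvCounts reviews aspect)) res).get? a =
      if a ∈ l then some (pvCounts reviews a) else res.get? a := by
  induction l generalizing res with
  | nil => simp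
  | cons b l ih =>
    simp only [List.foldl_cons, ih, List.mem_cons]
    by_cases h : a ∈ l
    · simp [h]
    · by_cases hab : a = b
      · subst hab; simp [h, PySem.Dict.get?_insert_self]
      · simp [h, hab, PySem.Dict.get?_insert_of_ne _ _ hab]

-- on a nodup-keyed item list, filtering for key `a` yields exactly the first (unique) match
lemma pvFilter_nodup (a : String) (L : List (String × String)) (h : (L.map (·.1)).Nodup) :
    (L.filter (fun p => p.1 == a)).map (·.2) =
      ((L.find? (fun p => p.1 == a)).map (·.2)).toList := by
  induction L with
  | nil => simp
  | cons p L ih =>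
    simp only [List.map_cons, List.nodup_cons] at h
    by_cases hp : p.1 = a
    · have : (L.filter (fun q => q.1 == a)) = [] := by
        rw [List.filter_eq_nil_iff]
        intro q hq hqa
        exact h.1 (by rw [hp, ← (by simpa using hqa : q.1 = a)]; exact List.mem_map_of_mem hq)
      simp [hp, this]
    · have hb : (p.1 == a) = false := by simpa using hp
      simp [hb, ih h.2]

lemma pvCounts_aux (reviews : List (List (String × Option (List (String × String))))) (a : String)
    (c : PySem.Dict String Int) :
    reviews.foldl (fun c review =>
      match (PySem.Dict.ofList review).get? "top_aspect_sentiments" with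
      | some (some tas) =>
          match (PySem.Dict.ofList tas).get? a with
          | some s => c.modify s 0 (· + 1)
          | none => c
      | _ => c) c = (pvOcc reviews a).foldl (fun c s => c.modify s 0 (· + 1)) c := by
  induction reviews generalizing c with
  | nil => simp [pvOcc]
  | cons r rs ih =>
    have hocc : pvOcc (r :: rs) a =
        (match (PySem.Dict.ofList r).get? "top_aspect_sentiments" with
         | some (some tas) => ((PySem.Dict.ofList tas).items.filter (fun p => p.1 == a)).map (·.2)
         | _ => []) ++ pvOcc rs a := by
      simp only [pvOcc, List.flatMap_cons]; rfl
    rw [hocc]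
    simp only [List.foldl_cons, List.foldl_append]
    cases hg : (PySem.Dict.ofList r).get? "top_aspect_sentiments" with
    | none => dsimp only; exact ih c
    | some o =>
      cases o with
      | none => dsimp only; exact ih c
      | some tas =>
        dsimp only
        have hn : ((PySem.Dict.ofList tas).items.map (·.1)).Nodup :=
          PySem.Dict.nodup_keys_ofList tas
        rw [pvFilter_nodup a _ hn]
        have hga : (PySem.Dict.ofList tas).get? a =
            ((PySem.Dict.ofList tas).items.find? (fun p => p.1 == a)).map (·.2) := rfl
        rw [← hga]
        cases (PySem.Dict.ofList tas).get? a <;> simp [ih]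

lemma pvCounts_eq_occ (reviews : List (List (String × Option (List (String × String))))) (a : String) :
    pvCounts reviews a = (pvOcc reviews a).foldl (fun c s => c.modify s 0 (· + 1)) PySem.Dict.empty :=
  pvCounts_aux reviews a PySem.Dict.empty

-- key list of A's review fold is unchanged
lemma pvStepItem_keys (L : List (String × String)) (d : PySem.Dict String (PySem.Dict String Int)) :
    (L.foldl pvStepItem d).keys = d.keys := by
  induction L generalizing d with
  | nil => rfl
  | cons p L ih =>
    rw [List.foldl_cons, ih]
    unfold pvStepItem
    by_cases hc : d.contains p.1
    · simp [hc, PySem.Dict.modify, PySem.Dict.keys_insert_of_contains _ _ hc]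
    · simp [hc]

lemma pvStepReview_keys (rs : List (List (String × Option (List (String × String)))))
    (d : PySem.Dict String (PySem.Dict String Int)) :
    (rs.foldl pvStepReview d).keys = d.keys := by
  induction rs generalizing d with
  | nil => rfl
  | cons r rs ih =>
    rw [List.foldl_cons, ih]
    unfold pvStepReview
    cases (PySem.Dict.ofList r).get? "top_aspect_sentiments" with
    | none => rfl
    | some o => cases o with
      | none => rfl
      | some tas => exact pvStepItem_keys _ d

-- two dicts with the same (nodup) key list and the same lookups are equal
lemma pvDict_ext {ν : Type} (d e : PySem.Dict String ν) (hk : d.keys = e.keys)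
    (hnd : d.keys.Nodup) (hget : ∀ a, d.get? a = e.get? a) : d = e := by
  apply PySem.Dict.ext
  have hne : e.keys.Nodup := hk ▸ hnd
  have hlen : d.items.length = e.items.length := by
    have := congrArg List.length hk
    simpa [PySem.Dict.keys] using this
  apply List.ext_getElem hlen
  intro i h1 h2
  have hfst : d.items[i].1 = e.items[i].1 := by
    have := congrArg (fun l => l[i]?) hk
    simp only [PySem.Dict.keys, List.getElem?_map] at this
    rw [List.getElem?_eq_getElem h1, List.getElem?_eq_getElem h2] at this
    simpa using this
  have hd : d.get? d.items[i].1 = some d.items[i].2 :=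
    PySem.Dict.get?_of_mem_items d (by simp [List.getElem_mem h1]) hnd
  have he : e.get? e.items[i].1 = some e.items[i].2 :=
    PySem.Dict.get?_of_mem_items e (by simp [List.getElem_mem h2]) hne
  have : some d.items[i].2 = some e.items[i].2 := by
    rw [← hd, hget, hfst, he]
  exact Prod.ext hfst (by simpa using this)

lemma pvOuter_eq (reviews : List (List (String × Option (List (String × String)))))
    (top_aspects : List String) :
    reviews.foldl pvStepReview (pvInit top_aspects) =
      top_aspects.foldl (fun res aspect => res.insert aspect (pvCounts reviews aspect))
        PySem.Dict.empty := by
  apply pvDict_ext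
  · rw [pvStepReview_keys]
    unfold pvInit
    rw [PySem.Dict.keys_foldl_insert, PySem.Dict.keys_foldl_insert]
  · rw [pvStepReview_keys]
    unfold pvInit
    exact PySem.Dict.nodup_keys_foldl_insert _ _ _ PySem.Dict.nodup_keys_empty
  · intro a
    rw [pvStepReview_foldl_get?, pvAlt_get?]
    unfold pvInit
    rw [pvInit_get?]
    by_cases h : a ∈ top_aspects
    · simp only [h, if_true, Option.map_some, pvCounts_eq_occ]
    · simp [h, PySem.Dict.get?_empty]

-- ===== VERDICT (by name: the statement is the Claim_ definition above) =====
theorem calculate_overall_statistics_spec : Claim_equal_calculate_overall_statistics := by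
  intro reviews top_aspects _ _
  unfold Spec_calculate_overall_statistics
  unfold calculate_overall_statistics calculate_overall_statistics_alt
  rw [pvOuter_eq]
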